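-- pv_equiv track=rewrite | github.com/samsaksfithian/adventofcode | 2020/Day11/day11.py | updateCoordPart2
-- ===== SOURCE A (Python) =====
-- empty = "L"
--
-- occupied = "#"
--
-- floor = "."
--
-- def outOfBounds(index, array):
--     return index < 0 or len(array) <= index
--
-- def outOfGrid(rowNum, colNum, grid):
--     return outOfBounds(rowNum, grid) or outOfBounds(colNum, grid[rowNum])
--
-- direcMap = {
--     "N": [-1, 0],
--     "NE": [-1, 1],
--     "E": [0, 1],
--     "SE": [1, 1],
--     "S": [1, 0],
--     "SW": [1, -1],
--     "W": [0, -1],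
--     "NW": [-1, -1],
-- }
--
-- def foundOccSeatInLine(rowNum, colNum, grid, moveAmts):
--     nextRow = rowNum + moveAmts[0]
--     nextCol = colNum + moveAmts[1]
--     if outOfGrid(nextRow, nextCol, grid):
--         return False
--     nextSeat = grid[nextRow][nextCol]
--     if nextSeat == occupied:
--         return True
--     if nextSeat == empty:
--         return False
--     return foundOccSeatInLine(nextRow, nextCol, grid, moveAmts)
--
-- def updateCoordPart2(row, col, grid):
--     numVisibleOccupied = 0
--     seatStart = grid[row][col]
--     if seatStart == floor:
--         return seatStart
--
--     for direction in direcMap.keys():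
--         if foundOccSeatInLine(row, col, grid, direcMap[direction]):
--             numVisibleOccupied += 1
--
--     if seatStart == empty and numVisibleOccupied == 0:
--         return occupied
--     if seatStart == occupied and numVisibleOccupied >= 5:
--         return empty
--     return seatStart
-- ===== SOURCE B (Python) =====
-- empty = "L"
-- occupied = "#"
-- floor = "."
--
-- DIRECTIONS = ((-1, 0), (-1, 1), (0, 1), (1, 1), (1, 0), (1, -1), (0, -1), (-1, -1))
--
-- def updateCoordPart2(row, col, grid):
--     seat = grid[row][col]
--     if seat == floor:
--         return seat
--     maxRowLen = max((len(r) for r in grid), default=0)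
--     limit = len(grid) + maxRowLen + 1
--     count = 0
--     for dr, dc in DIRECTIONS:
--         # collect the in-bounds prefix of cells along this ray
--         cells = []
--         for k in range(1, limit + 1):
--             r, c = row + dr * k, col + dc * k
--             if not (0 <= r < len(grid) and 0 <= c < len(grid[r])):
--                 break
--             cells.append(grid[r][c])
--         seats = [s for s in cells if s == occupied or s == empty]
--         if seats and seats[0] == occupied:
--             count += 1
--     if seat == empty and count == 0:
--         return occupied
--     if seat == occupied and count >= 5:
--         return empty
--     return seat
-- ===== Notes on version B (the rewrite author's own statement) =====
-- stated objective: alternative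
-- what changed: Replaces the per-direction tail-recursive probe (foundOccSeatInLine with early returns) by a data-flow decomposition: build the bounded in-bounds prefix of cells along each ray, filter to seats, and test whether the first seat is occupied.
import Mathlib
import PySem

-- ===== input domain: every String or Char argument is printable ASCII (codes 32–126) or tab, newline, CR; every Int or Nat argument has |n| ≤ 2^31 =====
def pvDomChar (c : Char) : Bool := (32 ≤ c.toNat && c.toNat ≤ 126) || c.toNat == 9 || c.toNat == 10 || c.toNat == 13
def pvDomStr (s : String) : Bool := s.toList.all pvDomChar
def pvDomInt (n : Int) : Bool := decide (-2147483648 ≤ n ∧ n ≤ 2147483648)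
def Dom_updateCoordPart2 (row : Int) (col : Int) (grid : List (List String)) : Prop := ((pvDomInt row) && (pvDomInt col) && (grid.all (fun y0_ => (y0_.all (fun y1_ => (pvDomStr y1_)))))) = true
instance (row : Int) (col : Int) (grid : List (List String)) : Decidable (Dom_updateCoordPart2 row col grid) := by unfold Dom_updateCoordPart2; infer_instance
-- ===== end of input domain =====

-- B replaces A's per-direction tail recursion by building each ray's in-bounds cell prefix,
-- filtering to seats and inspecting the first one; same values, no speed claim.


-- ===== PORT A =====
def pyOutOfBounds {α : Type} (index : Int) (array : List α) : Bool :=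
  index < 0 || (array.length : Int) ≤ index

def pyOutOfGrid (rowNum colNum : Int) (grid : List (List String)) : Bool :=
  pyOutOfBounds rowNum grid || pyOutOfBounds colNum ((PySem.List.pyGet? grid rowNum).getD [])

def direcMap : List (String × (Int × Int)) :=
  [("N", (-1, 0)), ("NE", (-1, 1)), ("E", (0, 1)), ("SE", (1, 1)),
   ("S", (1, 0)), ("SW", (1, -1)), ("W", (0, -1)), ("NW", (-1, -1))]

-- fuel is a totality guard only: len(grid) + longest row + 1 exceeds any in-bounds ray length
def maxRowLen (grid : List (List String)) : Nat :=
  grid.foldl (fun m r => max m r.length) 0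

def foundOccSeatInLine (rowNum colNum : Int) (grid : List (List String))
    (moveAmts : Int × Int) : Nat → Bool
  | 0 => false
  | fuel + 1 =>
    let nextRow := rowNum + moveAmts.1
    let nextCol := colNum + moveAmts.2
    if pyOutOfGrid nextRow nextCol grid then false
    else
      let nextSeat := (PySem.List.pyGet? ((PySem.List.pyGet? grid nextRow).getD []) nextCol).getD ""
      if nextSeat == "#" then true
      else if nextSeat == "L" then false
      else foundOccSeatInLine nextRow nextCol grid moveAmts fuel

def updateCoordPart2 (row : Int) (col : Int) (grid : List (List String)) : String :=
  let seatStart := (PySem.List.pyGet? ((PySem.List.pyGet? grid row).getD []) col).getD ""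
  if seatStart == "." then seatStart
  else
    let fuel := grid.length + maxRowLen grid + 1
    let numVisibleOccupied : Int := direcMap.foldl
      (fun acc p => if foundOccSeatInLine row col grid p.2 fuel then acc + 1 else acc) 0
    if seatStart == "L" && numVisibleOccupied == 0 then "#"
    else if seatStart == "#" && numVisibleOccupied ≥ 5 then "L"
    else seatStart

-- ===== PORT B =====
def inGrid (r c : Int) (grid : List (List String)) : Bool :=
  0 ≤ r && r < (grid.length : Int) && 0 ≤ c
    && c < (((PySem.List.pyGet? grid r).getD []).length : Int)

def cellAt (r c : Int) (grid : List (List String)) : String :=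
  (PySem.List.pyGet? ((PySem.List.pyGet? grid r).getD []) c).getD ""

-- the inner for-k loop with break: in-bounds prefix of cells along the ray
def rayCells (row col dr dc : Int) (grid : List (List String)) : List Nat → List String
  | [] => []
  | k :: ks =>
    let r := row + dr * k
    let c := col + dc * k
    if inGrid r c grid then cellAt r c grid :: rayCells row col dr dc grid ks else []

def firstSeatOccupied (row col dr dc : Int) (grid : List (List String)) (limit : Nat) : Bool :=
  let cells := rayCells row col dr dc grid (List.range' 1 limit)
  let seats := cells.filter (fun s => s == "#" || s == "L")
  seats.head? == some "#"

def updateCoordPart2_alt (row : Int) (col : Int) (grid : List (List String)) : String :=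
  let seat := cellAt row col grid
  if seat == "." then seat
  else
    let limit := grid.length + maxRowLen grid + 1
    let dirs : List (Int × Int) :=
      [(-1, 0), (-1, 1), (0, 1), (1, 1), (1, 0), (1, -1), (0, -1), (-1, -1)]
    let count : Int := dirs.foldl
      (fun acc d => if firstSeatOccupied row col d.1 d.2 grid limit then acc + 1 else acc) 0
    if seat == "L" && count == 0 then "#"
    else if seat == "#" && count ≥ 5 then "L"
    else seat

-- ===== PRECONDITION & SPEC =====
-- Pre_ excludes exactly the inputs where Python A raises IndexError on grid[row][col]
def Pre_updateCoordPart2 (row : Int) (col : Int) (grid : List (List String)) : Prop :=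
  ((PySem.List.pyGet? grid row).bind (fun r => PySem.List.pyGet? r col)).isSome = true
instance (row : Int) (col : Int) (grid : List (List String)) : Decidable (Pre_updateCoordPart2 row col grid) := by unfold Pre_updateCoordPart2; infer_instance
def pvWitness_updateCoordPart2 : Int × Int × List (List String) := (0, 0, [["L"]])

def Spec_updateCoordPart2 (row : Int) (col : Int) (grid : List (List String)) (out : String) : Prop := out = updateCoordPart2_alt row col grid
instance (row : Int) (col : Int) (grid : List (List String)) (out : String) : Decidable (Spec_updateCoordPart2 row col grid out) := by unfold Spec_updateCoordPart2; infer_instance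

-- ===== CLAIM (what is proved, stated in full; the proofs are below) =====
def Claim_equal_updateCoordPart2 : Prop := ∀ (row : Int) (col : Int) (grid : List (List String)), Dom_updateCoordPart2 row col grid → Pre_updateCoordPart2 row col grid → Spec_updateCoordPart2 row col grid (updateCoordPart2 row col grid)

-- ===== LEMMAS AND PROOFS =====
lemma pyOutOfGrid_eq_not_inGrid (r c : Int) (grid : List (List String)) :
    pyOutOfGrid r c grid = ! inGrid r c grid := by
  rw [Bool.eq_iff_iff]
  simp only [pyOutOfGrid, pyOutOfBounds, inGrid, Bool.or_eq_true,
    Bool.not_eq_true', Bool.and_eq_false_iff, decide_eq_true_eq, decide_eq_false_iff_not]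
  omega

lemma rayCells_shift (row col dr dc : Int) (grid : List (List String)) (ks : List Nat) :
    rayCells row col dr dc grid (ks.map (· + 1)) =
    rayCells (row + dr) (col + dc) dr dc grid ks := by
  induction ks with
  | nil => rfl
  | cons k ks ih =>
    simp only [List.map_cons, rayCells]
    have hr : row + dr * ((k : Int) + 1) = (row + dr) + dr * k := by ring
    have hc : col + dc * ((k : Int) + 1) = (col + dc) + dc * k := by ring
    push_cast
    rw [hr, hc, ih]

lemma found_eq_first (dr dc : Int) (grid : List (List String)) :
    ∀ (n : Nat) (row col : Int),
    foundOccSeatInLine row col grid (dr, dc) n = firstSeatOccupied row col dr dc grid n := by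
  intro n
  induction n with
  | zero => intro row col; rfl
  | succ n ih =>
    intro row col
    have hrange : List.range' 1 (n + 1) = 1 :: (List.range' 1 n).map (· + 1) := by
      rw [List.range'_succ]
      congr 1
      exact List.range'_succ_left
    simp only [foundOccSeatInLine, firstSeatOccupied, hrange, rayCells]
    rw [pyOutOfGrid_eq_not_inGrid]
    have h1 : row + dr * ((1 : Nat) : Int) = row + dr := by push_cast; ring
    have h2 : col + dc * ((1 : Nat) : Int) = col + dc := by push_cast; ring
    rw [h1, h2, rayCells_shift]
    by_cases hg : inGrid (row + dr) (col + dc) grid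
    · simp only [hg, Bool.not_true, if_false, if_true, Bool.false_eq_true]
      by_cases hocc : cellAt (row + dr) (col + dc) grid == "#"
      · simp [cellAt, List.filter] at *
        simp [hocc]
      · by_cases hemp : cellAt (row + dr) (col + dc) grid == "L"
        · simp only [cellAt] at hocc hemp ⊢
          simp [hocc, hemp]
        · simp only [cellAt] at hocc hemp ⊢
          simp only [List.filter_cons, hocc, hemp, Bool.or_self]
          rw [ih]
          simp [firstSeatOccupied]
    · simp [hg]

-- ===== VERDICT (by name: the statement is the Claim_ definition above) =====
theorem updateCoordPart2_spec : Claim_equal_updateCoordPart2 := by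
  intro row col grid hdom hpre
  unfold Spec_updateCoordPart2 updateCoordPart2 updateCoordPart2_alt
  simp only [cellAt, direcMap, List.foldl, found_eq_first]
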